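-- pv_equiv track=rewrite | github.com/bholagabbar/algorithmic-programming | Code/WorkspaceB/Python Scripts/BRACKETS.py | mbal
-- ===== SOURCE A (Python) =====
-- def mbal(a):
-- 	bal=0
-- 	mb=0
-- 	for i in range(len(a)):
-- 		if(a[i]=='('):
-- 			bal+=1
-- 		elif(a[i]==')'):
-- 			bal-=1
-- 		mb=max(mb,bal)
--
-- 	return mb
-- ===== SOURCE B (Python) =====
-- def mbal(a):
--     # Divide and conquer: each segment is summarised by (delta, best) where
--     # delta is its total bracket balance change and best is the maximum
--     # balance reached over its non-empty prefixes; summaries merge as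
--     # (d1+d2, max(b1, d1+b2)).
--     def go(lo, hi):
--         if hi - lo == 1:
--             d = 1 if a[lo] == '(' else -1 if a[lo] == ')' else 0
--             return (d, d)
--         m = (lo + hi) // 2
--         d1, b1 = go(lo, m)
--         d2, b2 = go(m, hi)
--         return (d1 + d2, max(b1, d1 + b2))
--     if not a:
--         return 0
--     return max(0, go(0, len(a))[1])
-- ===== Notes on version B (the rewrite author's own statement) =====
-- stated objective: alternative
-- what changed: Replaces A's single left-to-right scan carrying a running balance and running max with a divide-and-conquer over halves: each segment is summarised by (total delta, max non-empty prefix balance) and summaries are merged with (d1+d2, max(b1, d1+b2)); the answer is max(0, best of the whole string).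
import Mathlib
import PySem

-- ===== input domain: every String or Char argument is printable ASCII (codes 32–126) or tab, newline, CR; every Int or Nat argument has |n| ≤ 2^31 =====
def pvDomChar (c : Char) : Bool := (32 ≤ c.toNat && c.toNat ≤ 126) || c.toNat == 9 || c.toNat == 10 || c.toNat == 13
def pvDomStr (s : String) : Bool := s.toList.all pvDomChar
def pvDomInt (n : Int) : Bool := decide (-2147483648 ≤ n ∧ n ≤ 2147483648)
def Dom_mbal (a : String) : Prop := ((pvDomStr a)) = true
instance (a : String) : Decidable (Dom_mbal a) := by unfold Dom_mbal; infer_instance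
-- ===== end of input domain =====

-- B replaces A's single running-balance scan with a divide-and-conquer:
-- each half is summarised by (total delta, max non-empty prefix balance) and merged.

-- ===== PORT A =====
-- one loop step of A: update bal by the bracket delta, then mb = max(mb, bal)
def mbalStep (st : Int × Int) (c : Char) : Int × Int :=
  let bal := st.1 + (if c = '(' then 1 else if c = ')' then -1 else 0)
  (bal, max st.2 bal)

def mbal (a : String) : Int :=
  (a.toList.foldl mbalStep (0, 0)).2

-- ===== PORT B =====
def bdelta (c : Char) : Int := if c = '(' then 1 else if c = ')' then -1 else 0

-- go(lo, hi) of Source B on the segment as a list: (delta, max non-empty prefix balance)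
def mbalGo : List Char → Int × Int
  | [] => (0, 0)   -- unreachable in mbal_alt (segments are non-empty)
  | [c] => (bdelta c, bdelta c)
  | c1 :: c2 :: rest =>
      let l := c1 :: c2 :: rest
      let m := l.length / 2
      let p := mbalGo (l.take m)
      let q := mbalGo (l.drop m)
      (p.1 + q.1, max p.2 (p.1 + q.2))
termination_by l => l.length
decreasing_by
  · simp [List.length_take]; omega
  · simp [List.length_drop]; omega

def mbal_alt (a : String) : Int :=
  match a.toList with
  | [] => 0
  | l => max 0 (mbalGo l).2

-- ===== PRECONDITION & SPEC =====
def Spec_mbal (a : String) (out : Int) : Prop := out = mbal_alt a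
instance (a : String) (out : Int) : Decidable (Spec_mbal a out) := by unfold Spec_mbal; infer_instance

-- ===== CLAIM (what is proved, stated in full; the proofs are below) =====
def Claim_equal_mbal : Prop := ∀ (a : String), Dom_mbal a → Spec_mbal a (mbal a)

-- ===== LEMMAS AND PROOFS =====
-- A's fold over a non-empty segment, started at (bal, mb), lands at the segment
-- summary computed by B's divide-and-conquer.
theorem mbal_foldl_go (l : List Char) (hne : l ≠ []) :
    ∀ (bal mb : Int),
      l.foldl mbalStep (bal, mb) = (bal + (mbalGo l).1, max mb (bal + (mbalGo l).2)) := by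
  induction l using mbalGo.induct with
  | case1 => exact absurd rfl hne
  | case2 c =>
      intro bal mb
      simp [mbalGo, mbalStep, bdelta, List.foldl]
  | case3 c1 c2 rest hl hm ih1 ih2 =>
      intro bal mb
      simp only [hm, hl] at ih1 ih2
      have htne : (c1 :: c2 :: rest).take ((c1 :: c2 :: rest).length / 2) ≠ [] := by
        intro h
        have := congrArg List.length h
        simp [List.length_take] at this
      have hdne : (c1 :: c2 :: rest).drop ((c1 :: c2 :: rest).length / 2) ≠ [] := by
        intro h
        have := congrArg List.length h
        simp [List.length_drop] at this
        omega
      have hsplit : (c1 :: c2 :: rest) =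
          (c1 :: c2 :: rest).take ((c1 :: c2 :: rest).length / 2) ++
          (c1 :: c2 :: rest).drop ((c1 :: c2 :: rest).length / 2) := by simp
      rw [show ((c1 :: c2 :: rest).foldl mbalStep (bal, mb)) =
          (((c1 :: c2 :: rest).take ((c1 :: c2 :: rest).length / 2) ++
            (c1 :: c2 :: rest).drop ((c1 :: c2 :: rest).length / 2)).foldl mbalStep (bal, mb))
          from by rw [← hsplit]]
      rw [List.foldl_append]
      rw [ih1 htne, ih2 hdne]
      rw [show mbalGo (c1 :: c2 :: rest) =
          (let l := c1 :: c2 :: rest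
           let m := l.length / 2
           let p := mbalGo (l.take m)
           let q := mbalGo (l.drop m)
           (p.1 + q.1, max p.2 (p.1 + q.2))) from by rw [mbalGo]]
      simp only [Prod.mk.injEq]
      refine ⟨by ring, by omega⟩

-- ===== VERDICT (by name: the statement is the Claim_ definition above) =====
theorem mbal_spec : Claim_equal_mbal := by
  intro a _
  show mbal a = mbal_alt a
  unfold mbal mbal_alt
  cases h : a.toList with
  | nil => simp
  | cons c cs =>
      have := mbal_foldl_go (c :: cs) (by simp) 0 0
      rw [this]
      simp
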